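-- pv_equiv track=rewrite | github.com/Gauravs-2k/FedPrivLoRA | app/lora/instruction_residual_lora.py | _prepare_hr
-- ===== SOURCE A (Python) =====
-- def _prepare_hr(example):
-- 	conversation = example.get("messages") or []
-- 	segments = []
-- 	response = ""
-- 	for message in conversation:
-- 		role = message.get("role")
-- 		content = (message.get("content") or "").strip()
-- 		if role == "assistant":
-- 			response = content
-- 			break
-- 		label = "System" if role == "system" else "User"
-- 		segments.append(f"{label}: {content}")
-- 	prompt = "\n".join(segments)
-- 	return {"prompt": prompt, "response": response}
-- ===== SOURCE B (Python) =====
-- def _prepare_hr(example):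
--     conversation = example.get("messages") or []
--     # pass 1: locate the first assistant message
--     idx = next((i for i, m in enumerate(conversation) if m.get("role") == "assistant"),
--                len(conversation))
--     # pass 2: format every message before the split point
--     segments = [
--         f"{'System' if m.get('role') == 'system' else 'User'}: {(m.get('content') or '').strip()}"
--         for m in conversation[:idx]
--     ]
--     response = (conversation[idx].get("content") or "").strip() if idx < len(conversation) else ""
--     return {"prompt": "\n".join(segments), "response": response}
-- ===== Notes on version B (the rewrite author's own statement) =====
-- stated objective: alternative
-- what changed: A's single loop with break and a mutable segments accumulator is replaced by a two-pass decomposition: first find the index of the first assistant message, then build the segments as a comprehension over the prefix and read the response off the message at that index.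
import Mathlib
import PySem

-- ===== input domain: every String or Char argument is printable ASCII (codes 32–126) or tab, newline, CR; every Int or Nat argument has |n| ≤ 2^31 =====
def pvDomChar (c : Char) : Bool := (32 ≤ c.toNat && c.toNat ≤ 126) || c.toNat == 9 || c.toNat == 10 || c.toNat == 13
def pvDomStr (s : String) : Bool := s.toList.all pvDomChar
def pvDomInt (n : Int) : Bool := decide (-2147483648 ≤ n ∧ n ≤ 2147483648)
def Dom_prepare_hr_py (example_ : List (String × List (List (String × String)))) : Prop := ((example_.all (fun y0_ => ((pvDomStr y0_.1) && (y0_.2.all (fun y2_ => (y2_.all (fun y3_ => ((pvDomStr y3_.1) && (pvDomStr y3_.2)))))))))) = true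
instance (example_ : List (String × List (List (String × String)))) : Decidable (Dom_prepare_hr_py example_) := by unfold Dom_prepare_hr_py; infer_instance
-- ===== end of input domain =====

-- B replaces A's single break-loop by a two-pass decomposition (find the first
-- assistant index, then format the prefix by a comprehension); objective: alternative.

-- ===== PORT A =====
-- A's for-loop with break: accumulates `segments`, stops at the first assistant
-- message returning its stripped content as `response` ("" if the loop finishes).
def prepareLoopA : List (List (String × String)) → List String → List String × String
  | [], segments => (segments, "")
  | message :: rest, segments =>
    let role := List.lookup "role" message
    let content := PySem.Str.strip ((List.lookup "content" message).getD "")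
    if role == some "assistant" then (segments, content)
    else
      let label := if role == some "system" then "System" else "User"
      prepareLoopA rest (segments ++ [label ++ ": " ++ content])

-- `example.get("messages") or []` = `.getD []` (the only falsy list is []).
def prepare_hr_py (example_ : List (String × List (List (String × String)))) : List (String × String) :=
  let conversation := (List.lookup "messages" example_).getD []
  let r := prepareLoopA conversation []
  [("prompt", PySem.Str.join "\n" r.1), ("response", r.2)]

-- ===== PORT B =====
def isAssistantB (m : List (String × String)) : Bool :=
  List.lookup "role" m == some "assistant"

def fmtB (m : List (String × String)) : String :=
  (if List.lookup "role" m == some "system" then "System" else "User") ++ ": " ++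
    PySem.Str.strip ((List.lookup "content" m).getD "")

-- next(… enumerate …) with default len = List.findIdx; conversation[:idx] = take; comprehension = map.
def prepare_hr_py_alt (example_ : List (String × List (List (String × String)))) : List (String × String) :=
  let conversation := (List.lookup "messages" example_).getD []
  let idx := conversation.findIdx isAssistantB
  let segments := (conversation.take idx).map fmtB
  let response :=
    match conversation[idx]? with
    | some m => PySem.Str.strip ((List.lookup "content" m).getD "")
    | none => ""
  [("prompt", PySem.Str.join "\n" segments), ("response", response)]

-- ===== PRECONDITION & SPEC =====
def Spec_prepare_hr_py (example_ : List (String × List (List (String × String)))) (out : List (String × String)) : Prop := out = prepare_hr_py_alt example_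
instance (example_ : List (String × List (List (String × String)))) (out : List (String × String)) : Decidable (Spec_prepare_hr_py example_ out) := by unfold Spec_prepare_hr_py; infer_instance

-- ===== CLAIM (what is proved, stated in full; the proofs are below) =====
def Claim_equal_prepare_hr_py : Prop := ∀ (example_ : List (String × List (List (String × String)))), Dom_prepare_hr_py example_ → Spec_prepare_hr_py example_ (prepare_hr_py example_)

-- ===== LEMMAS AND PROOFS =====
lemma prepareLoopA_eq (conv : List (List (String × String))) :
    ∀ segments, prepareLoopA conv segments =
      (segments ++ (conv.take (conv.findIdx isAssistantB)).map fmtB,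
       match conv[conv.findIdx isAssistantB]? with
       | some m => PySem.Str.strip ((List.lookup "content" m).getD "")
       | none => "") := by
  induction conv with
  | nil => intro segments; simp [prepareLoopA]
  | cons m rest ih =>
    intro segments
    by_cases h : isAssistantB m = true
    · simp [prepareLoopA, isAssistantB] at h ⊢
      simp [h, List.findIdx_cons, isAssistantB]
    · have h' : (List.lookup "role" m == some "assistant") = false := by
        simpa [isAssistantB] using h
      simp only [prepareLoopA, h', Bool.false_eq_true, if_false]
      rw [ih]
      simp [List.findIdx_cons, isAssistantB, h', fmtB]

theorem prepare_hr_py_spec : Claim_equal_prepare_hr_py := by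
  intro example_ _
  unfold Spec_prepare_hr_py prepare_hr_py prepare_hr_py_alt
  simp only []
  rw [prepareLoopA_eq]
  simp

-- ===== VERDICT (by name: the statement is the Claim_ definition above) =====
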